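-- pv_equiv track=rewrite | github.com/ypisetsky/advent-of-code-2021 | lastyear/day14b.py | mask_address
-- ===== SOURCE A (Python) =====
-- def mask_address(mask, address):
--     chars = list(mask)[::-1]
--     for i in range(len(chars)):
--         if chars[i] != '0':
--             continue
--         if address & (1 << i) != 0:
--             chars[i] = '1'
--     return "".join(chars[::-1])
--
-- mask = ""
-- ===== SOURCE B (Python) =====
-- def mask_address(mask, address):
--     n = len(mask)
--     bits = format(address & ((1 << n) - 1), 'b').zfill(n)
--     return ''.join(b if m == '0' else m for m, b in zip(mask, bits))
-- ===== Notes on version B (the rewrite author's own statement) =====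
-- stated objective: idiomatic
-- what changed: Replaced the reverse-mutate-reverse loop with per-index bit tests (address & (1<<i)) by one precomputed binary-string representation of the masked address, zipped forward with the mask in a single pass.
import Mathlib
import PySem

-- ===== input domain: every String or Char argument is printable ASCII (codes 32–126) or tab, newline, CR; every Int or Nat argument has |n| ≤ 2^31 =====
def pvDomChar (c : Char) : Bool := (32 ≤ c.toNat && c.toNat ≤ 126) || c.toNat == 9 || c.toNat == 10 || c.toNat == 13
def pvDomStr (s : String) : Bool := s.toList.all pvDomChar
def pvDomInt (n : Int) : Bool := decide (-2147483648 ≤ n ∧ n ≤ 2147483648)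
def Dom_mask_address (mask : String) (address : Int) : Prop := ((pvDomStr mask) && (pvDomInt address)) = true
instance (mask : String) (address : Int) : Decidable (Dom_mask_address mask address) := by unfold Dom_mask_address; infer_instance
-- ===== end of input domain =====

-- B replaces A's reverse-mutate-reverse loop with per-index bit tests by one binary-string
-- rendering of the masked address zipped forward with the mask (objective: idiomatic, single pass).

-- ===== PORT A =====
-- one step of A's loop body: reads chars[i], possibly sets chars[i] = '1'
-- (i comes from range(len(chars)), so it is a valid non-negative index; 1 << i is 1 <<< i.toNat, exact for i ≥ 0)
def maskStep (address : Int) (cs : List Char) (i : Int) : List Char :=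
  if PySem.List.pyGetD cs i ' ' ≠ '0' then cs
  else if PySem.Int.band address (1 <<< i.toNat) ≠ 0 then PySem.List.pySetD cs i '1'
  else cs

def mask_address (mask : String) (address : Int) : String :=
  let chars := (PySem.List.slice? mask.toList none none (-1)).getD []   -- list(mask)[::-1]
  let final := (PySem.List.pyRange 0 (chars.length : Int) 1).foldl (maskStep address) chars
  String.ofList ((PySem.List.slice? final none none (-1)).getD [])     -- "".join(chars[::-1])

-- ===== PORT B =====
-- format(v, 'b') for v ≥ 0, hand-ported: binary digits, most significant first, "0" for 0 (exact for v ≥ 0)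
def toBin (v : Nat) : List Char :=
  if v < 2 then [if v = 1 then '1' else '0']
  else toBin (v / 2) ++ [if v % 2 = 1 then '1' else '0']
  decreasing_by exact Nat.div_lt_self (by omega) (by omega)

-- s.zfill(n) on a digit string: pad with '0' on the left to length n
def zfill (n : Nat) (s : List Char) : List Char := List.replicate (n - s.length) '0' ++ s

def mask_address_alt (mask : String) (address : Int) : String :=
  let n := mask.toList.length
  let v := PySem.Int.band address ((1 <<< n) - 1)    -- address & ((1 << n) - 1), always ≥ 0
  let bits := zfill n (toBin v.toNat)
  String.ofList (List.zipWith (fun m b => if m == '0' then b else m) mask.toList bits)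

-- ===== PRECONDITION & SPEC =====
def Spec_mask_address (mask : String) (address : Int) (out : String) : Prop := out = mask_address_alt mask address
instance (mask : String) (address : Int) (out : String) : Decidable (Spec_mask_address mask address out) := by unfold Spec_mask_address; infer_instance

-- ===== CLAIM (what is proved, stated in full; the proofs are below) =====
def Claim_equal_mask_address : Prop := ∀ (mask : String) (address : Int), Dom_mask_address mask address → Spec_mask_address mask address (mask_address mask address)

-- ===== LEMMAS AND PROOFS =====

-- what A's loop does to the character at (reversed) position i
def applyB (a : Int) (i : Nat) (c : Char) : Char :=
  if c ≠ '0' then c else if PySem.Int.band a ((2:Int) ^ i) ≠ 0 then '1' else c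

-- reference rendering: low n bits of v, most significant first
def binRec : Nat → Nat → List Char
  | 0, _ => []
  | n+1, v => binRec n (v / 2) ++ [if v % 2 = 1 then '1' else '0']

theorem two_pow_sub_one_toNat (n : Nat) : ((2:Int) ^ n - 1).toNat = 2 ^ n - 1 := by
  have h : ((2:Int) ^ n) = ((2 ^ n : Nat) : Int) := by push_cast; ring
  have h2 : 1 ≤ 2 ^ n := Nat.one_le_two_pow
  omega

theorem int_two_pow_cast (n : Nat) : ((2:Int) ^ n) = ((2 ^ n : Nat) : Int) := by push_cast; ring

theorem band_mask_nonneg_eq (a : Int) (n : Nat) (h : 0 ≤ a) :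
    PySem.Int.band a ((2:Int) ^ n - 1) = ((a.toNat % 2 ^ n : Nat) : Int) := by
  have h1 : 1 ≤ 2 ^ n := Nat.one_le_two_pow
  have hb : (0:Int) ≤ 2 ^ n - 1 := by rw [int_two_pow_cast]; omega
  rw [PySem.Int.band_of_nonneg h hb, two_pow_sub_one_toNat, Nat.and_two_pow_sub_one_eq_mod]

theorem band_mask_neg_eq (a : Int) (n : Nat) (h : ¬ 0 ≤ a) :
    PySem.Int.band a ((2:Int) ^ n - 1) = ((2 ^ n - ((-a-1).toNat % 2 ^ n + 1) : Nat) : Int) := by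
  have h1 : 1 ≤ 2 ^ n := Nat.one_le_two_pow
  have hb : (0:Int) ≤ 2 ^ n - 1 := by rw [int_two_pow_cast]; omega
  have hm : (-a-1).toNat % 2 ^ n < 2 ^ n := Nat.mod_lt _ (Nat.two_pow_pos n)
  simp only [PySem.Int.band, if_neg h, if_pos hb]
  rw [two_pow_sub_one_toNat, Nat.and_comm, Nat.and_two_pow_sub_one_eq_mod]
  congr 1
  omega

theorem band_pow_nonneg_eq (a : Int) (i : Nat) (h : 0 ≤ a) :
    PySem.Int.band a ((2:Int) ^ i) = (((a.toNat.testBit i).toNat * 2 ^ i : Nat) : Int) := by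
  have hb : (0:Int) ≤ 2 ^ i := by positivity
  rw [PySem.Int.band_of_nonneg h hb, int_two_pow_cast, Int.toNat_natCast, Nat.and_two_pow]

theorem band_pow_neg_eq (a : Int) (i : Nat) (h : ¬ 0 ≤ a) :
    PySem.Int.band a ((2:Int) ^ i) = ((2 ^ i - ((-a-1).toNat.testBit i).toNat * 2 ^ i : Nat) : Int) := by
  have hb : (0:Int) ≤ 2 ^ i := by positivity
  simp only [PySem.Int.band, if_neg h, if_pos hb]
  rw [int_two_pow_cast, Int.toNat_natCast, Nat.and_comm, Nat.and_two_pow]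

theorem band_mask_toNat_lt (a : Int) (n : Nat) : (PySem.Int.band a ((2:Int) ^ n - 1)).toNat < 2 ^ n := by
  have hp : 0 < 2 ^ n := Nat.two_pow_pos n
  by_cases h : 0 ≤ a
  · rw [band_mask_nonneg_eq a n h, Int.toNat_natCast]
    exact Nat.mod_lt _ hp
  · rw [band_mask_neg_eq a n h, Int.toNat_natCast]
    omega

-- the key bit fact: bit i of the masked value versus A's test address & (1 << i)
theorem key_bit (a : Int) (n i : Nat) (hi : i < n) :
    (PySem.Int.band a ((2:Int) ^ n - 1)).toNat.testBit i = true ↔ PySem.Int.band a ((2:Int) ^ i) ≠ 0 := by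
  have hp : 0 < 2 ^ i := Nat.two_pow_pos i
  by_cases h : 0 ≤ a
  · rw [band_mask_nonneg_eq a n h, band_pow_nonneg_eq a i h, Int.toNat_natCast]
    rw [Nat.testBit_mod_two_pow]
    cases hb : a.toNat.testBit i <;> simp <;> omega
  · rw [band_mask_neg_eq a n h, band_pow_neg_eq a i h, Int.toNat_natCast]
    have hm : (-a-1).toNat % 2 ^ n < 2 ^ n := Nat.mod_lt _ (Nat.two_pow_pos n)
    have := Nat.testBit_two_pow_sub_succ hm i
    rw [show 2 ^ n - ((-a-1).toNat % 2 ^ n + 1) = 2 ^ n - (((-a-1).toNat % 2 ^ n) + 1) from rfl, this]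
    rw [Nat.testBit_mod_two_pow]
    cases hb : (-a-1).toNat.testBit i <;> simp [hi]

-- the padded binary rendering is binRec
theorem binRec_zero (n : Nat) : binRec n 0 = List.replicate n '0' := by
  induction n with
  | zero => rfl
  | succ k ih => rw [binRec, ih, List.replicate_succ']; norm_num

theorem zfill_toBin (n : Nat) : ∀ v, v < 2 ^ n → 0 < n → zfill n (toBin v) = binRec n v := by
  induction n with
  | zero => omega
  | succ k ih =>
    intro v hv _
    by_cases h2 : v < 2
    · rw [toBin]
      simp only [h2, if_true]
      rw [binRec, show v / 2 = 0 by omega, binRec_zero, zfill]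
      simp only [List.length_cons, List.length_nil]
      rw [Nat.mod_eq_of_lt h2, Nat.add_sub_cancel]
    · have hk : 0 < k := by by_contra hk0; interval_cases k <;> omega
      have hps : 2 ^ (k + 1) = 2 * 2 ^ k := by ring
      have hv2 : v / 2 < 2 ^ k := by omega
      rw [toBin]
      simp only [h2, if_false]
      rw [binRec, ← ih (v / 2) hv2 hk]
      rw [zfill, zfill, List.length_append, List.length_singleton, ← List.append_assoc]
      rw [Nat.succ_sub_succ]

theorem binRec_length (n v : Nat) : (binRec n v).length = n := by
  induction n generalizing v with
  | zero => rfl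
  | succ k ih => rw [binRec]; simp [ih]

theorem binRec_getElem? (n : Nat) : ∀ (v j : Nat), j < n →
    (binRec n v)[j]? = some (if v.testBit (n - 1 - j) then '1' else '0') := by
  induction n with
  | zero => omega
  | succ k ih =>
    intro v j hj
    rw [binRec]
    by_cases hjk : j < k
    · rw [List.getElem?_append_left (by rw [binRec_length]; omega)]
      rw [ih (v / 2) j hjk]
      congr 2
      rw [show k + 1 - 1 - j = (k - 1 - j) + 1 by omega, ← Nat.testBit_div_two]
    · have hjk' : j = k := by omega
      have hlen : (binRec k (v / 2)).length = k := binRec_length _ _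
      rw [List.getElem?_append_right (by omega), hlen, hjk']
      rw [show k - k = 0 by omega, show k + 1 - 1 - k = 0 by omega, Nat.testBit_zero]
      rcases Nat.mod_two_eq_zero_or_one v with h | h <;> simp [h]

theorem maskStep_length (a : Int) (cs : List Char) (i : Int) : (maskStep a cs i).length = cs.length := by
  unfold maskStep
  split_ifs <;> simp [PySem.List.length_pySetD]

theorem loop_length (a : Int) (l : List Int) : ∀ cs : List Char, (l.foldl (maskStep a) cs).length = cs.length := by
  induction l with
  | nil => intro cs; rfl
  | cons x t ih => intro cs; rw [List.foldl_cons, ih, maskStep_length]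

theorem loop_getElem? (a : Int) (cs : List Char) :
    ∀ m : Nat, m ≤ cs.length → ∀ j : Nat,
    ((PySem.List.pyRange 0 (m : Int) 1).foldl (maskStep a) cs)[j]? =
      if j < m then (cs[j]?).map (applyB a j) else cs[j]? := by
  intro m
  induction m with
  | zero => intro _ j; simp [PySem.List.pyRange_one_eq_nil]
  | succ k ih =>
    intro hm j
    have hk : k ≤ cs.length := by omega
    have hkc : k < cs.length := by omega
    rw [show ((k + 1 : Nat) : Int) = (k : Int) + 1 by push_cast; ring,
        PySem.List.pyRange_one_succ_right (by positivity), List.foldl_append]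
    set L' := (PySem.List.pyRange 0 (k : Int) 1).foldl (maskStep a) cs with hL'
    have hget : ∀ j : Nat, L'[j]? = if j < k then (cs[j]?).map (applyB a j) else cs[j]? := ih hk
    have hlen : L'.length = cs.length := loop_length a _ cs
    have hck : cs[k]? = some cs[k] := List.getElem?_eq_getElem hkc
    have hgd : L'.getD k ' ' = cs[k] := by
      rw [List.getD_eq_getElem?_getD, hget k]; simp [hck]
    simp only [List.foldl_cons, List.foldl_nil, maskStep]
    rw [PySem.List.pyGetD_natCast, hgd, Int.toNat_natCast, Nat.shiftLeft_eq, one_mul, ← int_two_pow_cast]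
    by_cases hc0 : cs[k] = '0'
    · simp only [hc0, ne_eq, not_true_eq_false, if_false]
      by_cases hb : PySem.Int.band a ((2 : Int) ^ k) ≠ 0
      · rw [if_pos hb, PySem.List.pySetD_natCast, List.getElem?_set]
        by_cases hjk : j < k
        · rw [if_neg (by omega), hget j, if_pos hjk, if_pos (by omega)]
        · by_cases hjk2 : j = k
          · subst hjk2
            rw [if_pos rfl, if_pos (by omega), if_pos (by omega), hck]
            simp [applyB, hc0, hb]
          · rw [if_neg (by omega), hget j, if_neg (by omega), if_neg (by omega)]
      · rw [if_neg hb]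
        by_cases hjk : j < k
        · rw [hget j, if_pos hjk, if_pos (by omega)]
        · by_cases hjk2 : j = k
          · subst hjk2
            rw [hget j, if_neg (by omega), if_pos (by omega), hck]
            simp only [Option.map_some, applyB, hc0]
            simp [hb]
          · rw [hget j, if_neg (by omega), if_neg (by omega)]
    · rw [if_pos hc0]
      by_cases hjk : j < k
      · rw [hget j, if_pos hjk, if_pos (by omega)]
      · by_cases hjk2 : j = k
        · subst hjk2
          rw [hget j, if_neg (by omega), if_pos (by omega), hck]
          simp [applyB, hc0]
        · rw [hget j, if_neg (by omega), if_neg (by omega)]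

-- ===== VERDICT (by name: the statement is the Claim_ definition above) =====
theorem mask_address_spec : Claim_equal_mask_address := by
  intro mask address _
  unfold Spec_mask_address mask_address mask_address_alt
  simp only [PySem.List.slice?_none_none_neg_one, Option.getD_some]
  apply congrArg String.ofList
  set L := mask.toList with hL
  set n := L.length with hn
  rw [show (((1 <<< n : Nat) : Int) - 1) = (2 : Int) ^ n - 1 by
        rw [Nat.shiftLeft_eq, one_mul, ← int_two_pow_cast]]
  set v := PySem.Int.band address ((2 : Int) ^ n - 1) with hv
  have hvlt : v.toNat < 2 ^ n := band_mask_toNat_lt address n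
  have hrevlen : L.reverse.length = n := by simp [hn]
  rw [hrevlen]
  have hflen : ((PySem.List.pyRange 0 (n : Int) 1).foldl (maskStep address) L.reverse).length = n := by
    rw [loop_length]; exact hrevlen
  apply List.ext_getElem?
  intro j
  by_cases hj : j < n
  · have h0n : 0 < n := by omega
    rw [List.getElem?_reverse (by omega), hflen]
    rw [loop_getElem? address L.reverse n (by omega) (n - 1 - j), if_pos (by omega)]
    rw [List.getElem?_reverse (by omega), show L.length - 1 - (n - 1 - j) = j by omega]
    rw [zfill_toBin n v.toNat hvlt h0n]
    rw [List.getElem?_zipWith, binRec_getElem? n v.toNat j hj,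
        List.getElem?_eq_getElem (show j < L.length by omega)]
    simp only [Option.map_some]
    by_cases hc : L[j] = '0'
    · simp only [applyB, hc, ne_eq, not_true_eq_false, if_false, beq_self_eq_true, if_true]
      rcases hb : v.toNat.testBit (n - 1 - j) with _ | _
      · rw [if_neg (show ¬ PySem.Int.band address ((2 : Int) ^ (n - 1 - j)) ≠ 0 by
              intro hcon
              have hx := (key_bit address n (n - 1 - j) (by omega)).mpr hcon
              rw [hb] at hx; exact absurd hx (by simp))]
        simp
      · rw [if_pos ((key_bit address n (n - 1 - j) (by omega)).mp hb)]
        simp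
    · simp [applyB, hc]
  · rw [List.getElem?_eq_none (by rw [List.length_reverse, hflen]; omega),
        List.getElem?_eq_none (by rw [List.length_zipWith]; omega)]
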